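-- pv_equiv track=rewrite | github.com/its-cutie-valerie/daily-challenges | march-2026/3-16-oscars-2026/15_oscar_2026.py | oscar_pool
-- ===== SOURCE A (Python) =====
-- def oscar_pool(predictions):
--     # Write code below 💖
--     winners = ["One Battle After Another", "Michael B. Jordan", "Jessie Buckley", "Paul Thomas Anderson"]
--     max_score = -1
--     winner_name = ""
--
--     for friend in predictions:
--         name = friend[0]
--         preds = friend[1:]
--         score = 0
--
--         for i in range(len(winners)):
--             if preds[i] == winners[i]:
--                 score += 1
--
--         if score > max_score:
--             max_score = score
--             winner_name = name
--         elif score == max_score: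
--             winner_name = "Tie"
--
--     return winner_name
-- ===== SOURCE B (Python) =====
-- def oscar_pool(predictions):
--     winners = ["One Battle After Another", "Michael B. Jordan", "Jessie Buckley", "Paul Thomas Anderson"]
--     if not predictions:
--         return ""
--
--     def score(friend):
--         preds = friend[1:]
--         return sum(preds[i] == winners[i] for i in range(len(winners)))
--
--     scored = [(f[0], score(f)) for f in predictions]
--     best = max(s for _, s in scored)
--     names = [n for n, s in scored if s == best]
--     return names[0] if len(names) == 1 else "Tie"
-- ===== Notes on version B (the rewrite author's own statement) =====
-- stated objective: simpler
-- what changed: Replaces A's single stateful loop (running max, winner name, Tie overwrite logic) by a declarative pipeline: score every friend once, take the max, collect the names achieving it, and return Tie iff more than one.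
import Mathlib
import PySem

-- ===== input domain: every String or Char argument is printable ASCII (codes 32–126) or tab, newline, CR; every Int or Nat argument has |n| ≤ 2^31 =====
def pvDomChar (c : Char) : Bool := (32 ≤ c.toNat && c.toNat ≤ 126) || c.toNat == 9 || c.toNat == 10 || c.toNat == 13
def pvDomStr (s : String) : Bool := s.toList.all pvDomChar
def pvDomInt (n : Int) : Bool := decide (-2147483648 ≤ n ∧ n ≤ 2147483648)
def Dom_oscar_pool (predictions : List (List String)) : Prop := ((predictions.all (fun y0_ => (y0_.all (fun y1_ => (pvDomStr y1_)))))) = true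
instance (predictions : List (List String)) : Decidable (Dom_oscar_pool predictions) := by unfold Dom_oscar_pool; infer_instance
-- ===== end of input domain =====

-- B replaces A's single stateful loop (running max / winner name / Tie overwrite) by a
-- declarative pipeline (score all friends, take the max, collect names, Tie iff several): simpler, same cost.


-- ===== PORT A =====
def oscar_pool (predictions : List (List String)) : String :=
  let winners : List String :=
    ["One Battle After Another", "Michael B. Jordan", "Jessie Buckley", "Paul Thomas Anderson"]
  let st := predictions.foldl (fun (st : Int × String) friend =>
    let name := (PySem.List.pyGet? friend 0).getD ""
    let preds := PySem.List.slice friend (some 1) none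
    let score := (PySem.List.pyRange 0 (winners.length : Int) 1).foldl
      (fun s i => if PySem.List.pyGet? preds i = PySem.List.pyGet? winners i then s + 1 else s)
      (0 : Int)
    if score > st.1 then (score, name)
    else if score = st.1 then (st.1, "Tie")
    else st) ((-1 : Int), "")
  st.2

-- ===== PORT B =====
def oscar_pool_alt (predictions : List (List String)) : String :=
  let winners : List String :=
    ["One Battle After Another", "Michael B. Jordan", "Jessie Buckley", "Paul Thomas Anderson"]
  match predictions with
  | [] => ""
  | _ :: _ =>
    let scored := predictions.map (fun f =>
      ((PySem.List.pyGet? f 0).getD "",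
       (PySem.List.pyRange 0 (winners.length : Int) 1).foldl
         (fun (s : Int) i => if PySem.List.pyGet? (PySem.List.slice f (some 1) none) i = PySem.List.pyGet? winners i then s + 1 else s) 0))
    let best := (PySem.List.max? (scored.map Prod.snd) (fun x => x)).getD 0
    let names := (scored.filter (fun ns => ns.2 = best)).map Prod.fst
    match names with
    | [n] => n
    | _ => "Tie"

-- ===== PRECONDITION & SPEC =====
-- Pre_ excludes exactly the inputs on which A raises IndexError: a friend with fewer than
-- 5 entries (friend[0] on an empty friend, or preds[i], i < 4, on a short one).
def Pre_oscar_pool (predictions : List (List String)) : Prop :=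
  ∀ f ∈ predictions, 5 ≤ f.length
instance (predictions : List (List String)) : Decidable (Pre_oscar_pool predictions) := by
  unfold Pre_oscar_pool; infer_instance

def pvWitness_oscar_pool : List (List String) :=
  [["Ann", "One Battle After Another", "Michael B. Jordan", "x", "y"],
   ["Bob", "One Battle After Another", "x", "y", "z"]]

def Spec_oscar_pool (predictions : List (List String)) (out : String) : Prop := out = oscar_pool_alt predictions
instance (predictions : List (List String)) (out : String) : Decidable (Spec_oscar_pool predictions out) := by unfold Spec_oscar_pool; infer_instance

-- ===== CLAIM (what is proved, stated in full; the proofs are below) =====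
def Claim_equal_oscar_pool : Prop := ∀ (predictions : List (List String)), Dom_oscar_pool predictions → Pre_oscar_pool predictions → Spec_oscar_pool predictions (oscar_pool predictions)

-- ===== LEMMAS AND PROOFS =====
def pvStep (st : Int × String) (p : String × Int) : Int × String :=
  if p.2 > st.1 then (p.2, p.1) else if p.2 = st.1 then (st.1, "Tie") else st

theorem le_foldl_max2 (l : List (String × Int)) (m : Int) :
    m ≤ l.foldl (fun a p => max a p.2) m := by
  induction l generalizing m with
  | nil => simp
  | cons p t ih => simpa using le_trans (le_max_left m p.2) (ih _)

theorem pvStep_foldl_snd (l : List (String × Int)) (m : Int) (w : String) :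
    (l.foldl pvStep (m, w)).2 =
      if m = l.foldl (fun a p => max a p.2) m then
        (if l.countP (fun p => p.2 = l.foldl (fun a q => max a q.2) m) = 0 then w else "Tie")
      else if l.countP (fun p => p.2 = l.foldl (fun a q => max a q.2) m) = 1 then
        ((l.filter (fun p => p.2 = l.foldl (fun a q => max a q.2) m)).map Prod.fst).headD "Tie"
      else "Tie" := by
  induction l generalizing m w with
  | nil => simp
  | cons p t ih =>
    simp only [List.foldl_cons]
    by_cases h1 : p.2 > m
    · have hmax : max m p.2 = p.2 := by omega
      rw [pvStep, if_pos h1, ih]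
      simp only [hmax]
      set M := List.foldl (fun a p => max a p.2) p.2 t with hM
      have hple : p.2 ≤ M := by rw [hM]; exact le_foldl_max2 t p.2
      rw [if_neg (show ¬ m = M by omega)]
      by_cases h2 : p.2 = M
      · rw [if_pos h2, List.countP_cons_of_pos (by simpa using h2),
            List.filter_cons_of_pos (by simpa using h2)]
        by_cases h3 : List.countP (fun q => decide (q.2 = M)) t = 0
        · simp [h3]
        · rw [if_neg h3, if_neg (by omega)]
      · rw [if_neg h2, List.countP_cons_of_neg (by simpa using h2),
            List.filter_cons_of_neg (by simpa using h2)]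
    · rw [pvStep, if_neg h1]
      have hmax : max m p.2 = m := by omega
      by_cases h2 : p.2 = m
      · rw [if_pos (show p.2 = (m, w).1 from h2), ih]
        simp only [hmax]
        set M := List.foldl (fun a p => max a p.2) m t with hM
        have hle : m ≤ M := by rw [hM]; exact le_foldl_max2 t m
        by_cases h3 : m = M
        · have hp : p.2 = M := by omega
          rw [if_pos h3, if_pos h3, ite_self, List.countP_cons_of_pos (by simpa using hp),
              if_neg (by omega)]
        · have hp : ¬ p.2 = M := by omega
          rw [if_neg h3, if_neg h3, List.countP_cons_of_neg (by simpa using hp),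
              List.filter_cons_of_neg (by simpa using hp)]
      · have h3 : p.2 < m := by omega
        rw [if_neg (show ¬ p.2 = (m, w).1 from h2), ih]
        simp only [hmax]
        set M := List.foldl (fun a p => max a p.2) m t with hM
        have hle : m ≤ M := by rw [hM]; exact le_foldl_max2 t m
        have hp : ¬ p.2 = M := by omega
        rw [List.countP_cons_of_neg (by simpa using hp),
            List.filter_cons_of_neg (by simpa using hp)]

-- proof-side names for the shared pieces of the two ports
def pvWinners : List String :=
  ["One Battle After Another", "Michael B. Jordan", "Jessie Buckley", "Paul Thomas Anderson"]

def pvName (f : List String) : String := (PySem.List.pyGet? f 0).getD ""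

def pvScore (f : List String) : Int :=
  (PySem.List.pyRange 0 (pvWinners.length : Int) 1).foldl
    (fun (s : Int) i => if PySem.List.pyGet? (PySem.List.slice f (some 1) none) i = PySem.List.pyGet? pvWinners i then s + 1 else s) 0

theorem score_nonneg {α : Type} (l : List α) (cond : α → Prop) [DecidablePred cond] (s : Int) (hs : 0 ≤ s) :
    0 ≤ l.foldl (fun (s : Int) i => if cond i then s + 1 else s) s := by
  induction l generalizing s with
  | nil => simpa
  | cons p t ih =>
    simp only [List.foldl_cons]
    split <;> [exact ih _ (by omega); exact ih _ hs]

theorem pvScore_nonneg (f : List String) : 0 ≤ pvScore f :=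
  score_nonneg _ _ _ le_rfl

-- A's loop, written over the scored pairs
theorem oscar_pool_eq_pvStep (l : List (List String)) :
    oscar_pool l = ((l.map (fun f => (pvName f, pvScore f))).foldl pvStep (-1, "")).2 := by
  rw [oscar_pool, List.foldl_map]
  congr 1

-- B on a nonempty list, with the shared pieces named
theorem alt_char (f : List String) (rest : List (List String)) :
    oscar_pool_alt (f :: rest) =
      (match (((f :: rest).map (fun f => (pvName f, pvScore f))).filter
          (fun ns => ns.2 = (PySem.List.max? ((((f :: rest).map (fun f => (pvName f, pvScore f))).map Prod.snd)) (fun x => x)).getD 0)).map Prod.fst with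
       | [n] => n
       | _ => "Tie") := by
  simp only [oscar_pool_alt, pvName, pvScore, pvWinners]
  rfl

-- ===== VERDICT (by name: the statement is the Claim_ definition above) =====
theorem oscar_pool_spec : Claim_equal_oscar_pool := by
  intro predictions hdom hpre
  unfold Spec_oscar_pool
  match predictions with
  | [] => rfl
  | f :: rest =>
    rw [oscar_pool_eq_pvStep _, pvStep_foldl_snd, alt_char]
    simp only [List.map_cons, List.foldl_cons]
    have h0 : max (-1 : Int) (pvScore f) = pvScore f := by have := pvScore_nonneg f; omega
    simp only [h0]
    set M := List.foldl (fun a (p : String × Int) => max a p.2) (pvScore f) (rest.map (fun f => (pvName f, pvScore f))) with hM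
    have hfM : pvScore f ≤ M := by rw [hM]; exact le_foldl_max2 _ _
    have hneg : ¬ ((-1 : Int) = M) := by have := pvScore_nonneg f; omega
    have hbm : ((rest.map (fun f => (pvName f, pvScore f))).map Prod.snd).foldl max (pvScore f) = M := by
      rw [hM, List.foldl_map]
    simp only [PySem.List.max?_id_cons, Option.getD_some, hbm]
    rw [if_neg hneg]
    rcases hfl : List.filter (fun (p : String × Int) => decide (p.2 = M)) ((pvName f, pvScore f) :: rest.map (fun f => (pvName f, pvScore f))) with _ | ⟨q, _ | ⟨q2, qs2⟩⟩
    · simp [List.countP_eq_length_filter, hfl]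
    · simp [List.countP_eq_length_filter, hfl]
    · simp [List.countP_eq_length_filter, hfl]
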